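-- pv_equiv track=rewrite | github.com/s769/op_on_sg | python/quadrature.py | make_vortex
-- ===== SOURCE A (Python) =====
-- import itertools
--
-- def make_vortex(max_level):
--     '''
--         This function generates a list of addresses for the vertices chosen for
--         interpolation using the "vortex method."
--
--         Args:
--             max_level: integer representing the level of SG used for interpolation
--
--         Returns:
--             list of addresses for the vertices chosen for
--             interpolation using the "vortex method.
--     '''
--     addr0 = []
--     addr1 = []
--     addr2 = []
--     for i in range(max_level+1):
--         ad0 = '0'
--         ad1 = '1'
--         ad2 = '2'
--         for _ in itertools.repeat(None, i):
--             ad0 += '2'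
--             ad1 += '0'
--             ad2 += '1'
--         addr0.append(ad0)
--         addr1.append(ad1)
--         addr2.append(ad2)
--     return addr0 + addr1 + addr2
-- ===== SOURCE B (Python) =====
-- def make_vortex(max_level):
--     ad0, ad1, ad2 = '0', '1', '2'
--     addr0, addr1, addr2 = [], [], []
--     for _ in range(max_level + 1):
--         addr0.append(ad0)
--         addr1.append(ad1)
--         addr2.append(ad2)
--         ad0 += '2'
--         ad1 += '0'
--         ad2 += '1'
--     return addr0 + addr1 + addr2
-- ===== Notes on version B (the rewrite author's own statement) =====
-- stated objective: faster
-- what changed: Replaces A's nested reconstruction (each address rebuilt character-by-character from scratch per level) with a single cumulative pass keeping three running address strings that grow by one character per level.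
import Mathlib
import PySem

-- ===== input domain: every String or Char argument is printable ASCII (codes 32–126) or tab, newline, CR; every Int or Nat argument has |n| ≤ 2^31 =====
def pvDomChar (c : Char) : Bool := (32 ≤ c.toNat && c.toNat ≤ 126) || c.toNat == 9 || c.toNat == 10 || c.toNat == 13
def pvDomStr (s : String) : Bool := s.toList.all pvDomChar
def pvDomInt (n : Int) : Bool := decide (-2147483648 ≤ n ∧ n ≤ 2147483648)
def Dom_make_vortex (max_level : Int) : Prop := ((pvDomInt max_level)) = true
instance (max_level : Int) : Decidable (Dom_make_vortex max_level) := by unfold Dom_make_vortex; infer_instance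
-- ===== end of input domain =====

-- B replaces A's per-level inner reconstruction loop with one cumulative pass over
-- three running address strings (objective: faster by a constant factor).


-- ===== PORT A =====
-- inner loop: for _ in itertools.repeat(None, i): ad0 += '2'; ad1 += '0'; ad2 += '1'
def mvInner : Nat → String × String × String → String × String × String
  | 0, s => s
  | n + 1, s => mvInner n (s.1 ++ "2", s.2.1 ++ "0", s.2.2 ++ "1")

def make_vortex (max_level : Int) : List String :=
  let r := (PySem.List.pyRange 0 (max_level + 1) 1).foldl
      (fun acc i =>
        let s := mvInner i.toNat ("0", "1", "2")
        (acc.1 ++ [s.1], acc.2.1 ++ [s.2.1], acc.2.2 ++ [s.2.2]))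
      (([] : List String), ([] : List String), ([] : List String))
  r.1 ++ r.2.1 ++ r.2.2

-- ===== PORT B =====
-- one cumulative pass: append the current running strings, then grow each by one char
def altLoop : Nat → String → String → String → List String × List String × List String
  | 0, _, _, _ => ([], [], [])
  | n + 1, a, b, c =>
    let r := altLoop n (a ++ "2") (b ++ "0") (c ++ "1")
    (a :: r.1, b :: r.2.1, c :: r.2.2)

def make_vortex_alt (max_level : Int) : List String :=
  let r := altLoop (max_level + 1).toNat "0" "1" "2"
  r.1 ++ r.2.1 ++ r.2.2

-- ===== PRECONDITION & SPEC =====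
def Spec_make_vortex (max_level : Int) (out : List String) : Prop := out = make_vortex_alt max_level
instance (max_level : Int) (out : List String) : Decidable (Spec_make_vortex max_level out) := by unfold Spec_make_vortex; infer_instance

-- ===== CLAIM (what is proved, stated in full; the proofs are below) =====
def Claim_equal_make_vortex : Prop := ∀ (max_level : Int), Dom_make_vortex max_level → Spec_make_vortex max_level (make_vortex max_level)

-- ===== LEMMAS AND PROOFS =====

theorem altLoop_eq (n : Nat) : ∀ a b c : String, altLoop n a b c =
    ((List.range n).map (fun j => (mvInner j (a, b, c)).1),
     (List.range n).map (fun j => (mvInner j (a, b, c)).2.1),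
     (List.range n).map (fun j => (mvInner j (a, b, c)).2.2)) := by
  induction n with
  | zero => intro a b c; simp [altLoop]
  | succ n ih =>
    intro a b c
    simp only [altLoop, ih, List.range_succ_eq_map, List.map_cons, List.map_map]
    simp [mvInner, Function.comp_def]

theorem foldA_eq (n : Nat) :
    (List.range n).foldl
      (fun (acc : List String × List String × List String) (k : Nat) =>
        (acc.1 ++ [(mvInner k ("0", "1", "2")).1], acc.2.1 ++ [(mvInner k ("0", "1", "2")).2.1],
          acc.2.2 ++ [(mvInner k ("0", "1", "2")).2.2]))
      ([], [], []) =
    ((List.range n).map (fun j => (mvInner j ("0", "1", "2")).1),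
     (List.range n).map (fun j => (mvInner j ("0", "1", "2")).2.1),
     (List.range n).map (fun j => (mvInner j ("0", "1", "2")).2.2)) := by
  induction n with
  | zero => simp
  | succ n ih =>
    rw [List.range_succ, List.foldl_append]
    simp [ih]

-- ===== VERDICT (by name: the statement is the Claim_ definition above) =====
theorem make_vortex_spec : Claim_equal_make_vortex := by
  intro max_level _
  unfold Spec_make_vortex make_vortex make_vortex_alt
  rw [PySem.List.pyRange_one, altLoop_eq]
  rw [List.foldl_map]
  simp only [zero_add, Int.toNat_natCast, sub_zero]
  rw [foldA_eq]
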